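-- pv_equiv track=rewrite | github.com/Pastafarianist/mu-rainbow | utils.py | compactify_deck
-- ===== SOURCE A (Python) =====
-- def compactify_deck(hand, deck):
--     res = 0
--     i = 0
--     while deck:
--         if not (hand & 1):
--             res |= ((deck & 1) << i)
--             i += 1
--         else:
--             assert not (deck & 1)
--         deck >>= 1
--         hand >>= 1
--     return res
-- ===== SOURCE B (Python) =====
-- def compactify_deck(hand, deck):
--     # Walk the hand mask by runs: consume all deck bits below hand's lowest set
--     # bit in one chunk instead of bit by bit.
--     assert deck & hand == 0
--     res = 0
--     shift = 0
--     while hand and deck: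
--         b = (hand & -hand).bit_length() - 1   # position of hand's lowest set bit
--         res |= (deck & ((1 << b) - 1)) << shift
--         shift += b
--         deck >>= b + 1
--         hand >>= b + 1
--     return res | (deck << shift)
-- ===== Notes on version B (the rewrite author's own statement) =====
-- stated objective: alternative
-- what changed: A scans the mask bit by bit with a per-bit assert; B hoists the assert to a single `assert deck & hand == 0` and walks the hand mask by runs, jumping to hand's lowest set bit via (hand & -hand).bit_length() and transferring each run of deck bits below it in one mask-shift-or chunk.
import Mathlib
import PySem

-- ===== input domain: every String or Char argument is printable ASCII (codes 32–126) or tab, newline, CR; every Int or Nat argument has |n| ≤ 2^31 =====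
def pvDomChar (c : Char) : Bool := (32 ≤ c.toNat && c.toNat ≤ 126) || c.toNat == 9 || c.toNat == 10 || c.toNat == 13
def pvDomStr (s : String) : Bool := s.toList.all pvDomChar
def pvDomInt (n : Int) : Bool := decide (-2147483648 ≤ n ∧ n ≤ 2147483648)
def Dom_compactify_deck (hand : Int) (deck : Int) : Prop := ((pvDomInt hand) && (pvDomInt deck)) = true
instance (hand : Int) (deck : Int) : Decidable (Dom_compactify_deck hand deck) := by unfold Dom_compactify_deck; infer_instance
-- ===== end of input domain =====

-- B walks the hand mask by runs (lowest-set-bit jumps) instead of bit by bit; objective: alternative decomposition.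

-- termination helpers for the ports' loops (cited by name in decreasing_by)
theorem pvEdivLt (deck c : Int) (hd : 0 < deck) (hc : 2 ≤ c) : deck / c < deck := by
  by_contra h
  push_neg at h
  have h1 : deck / c * c ≤ deck := Int.ediv_mul_le deck (by omega)
  have h2 : deck * c ≤ deck / c * c := mul_le_mul_of_nonneg_right h (by omega)
  nlinarith

theorem pvShiftToNatLt (deck : Int) (k : Nat) (hd : 0 < deck) :
    (deck >>> (k + 1)).toNat < deck.toNat := by
  rw [Int.shiftRight_eq_div_pow]
  have hc : (2:Int) ≤ ((2 ^ (k + 1) : Nat) : Int) := by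
    have h2 : 2 ≤ 2 ^ (k + 1) := Nat.one_lt_two_pow (by omega)
    exact_mod_cast h2
  have h1 := pvEdivLt deck _ hd hc
  have h2 : 0 ≤ deck / ((2 ^ (k + 1) : Nat) : Int) := Int.ediv_nonneg (by omega) (by omega)
  omega

-- ===== PORT A =====
-- `while deck:` ported as recursion guarded by 0 < deck; for deck < 0 the Python loop never
-- terminates (excluded by Pre_), so the guard only makes the recursion total.
def compactify_deck_go (hand deck res : Int) (i : Nat) : Int :=
  if _h : 0 < deck then
    if PySem.Int.band hand 1 = 0 then
      -- res |= ((deck & 1) << i); i += 1; deck >>= 1; hand >>= 1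
      compactify_deck_go (hand >>> (1:Nat)) (deck >>> (1:Nat))
        (PySem.Int.bor res ((PySem.Int.band deck 1) <<< i)) (i + 1)
    else
      -- `assert not (deck & 1)`: raises in Python when band deck 1 ≠ 0 (excluded by Pre_)
      compactify_deck_go (hand >>> (1:Nat)) (deck >>> (1:Nat)) res i
  else res
termination_by deck.toNat
decreasing_by
  all_goals exact pvShiftToNatLt deck 0 _h

def compactify_deck (hand : Int) (deck : Int) : Int :=
  compactify_deck_go hand deck 0 0

-- ===== PORT B =====
-- b = (hand & -hand).bit_length() - 1
def compactify_deck_alt_b (hand : Int) : Nat :=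
  PySem.Int.bitLength (PySem.Int.band hand (-hand)) - 1

def compactify_deck_alt_go (hand deck res : Int) (shift : Nat) : Int :=
  if _h : hand ≠ 0 ∧ 0 < deck then
    compactify_deck_alt_go (hand >>> (compactify_deck_alt_b hand + 1))
      (deck >>> (compactify_deck_alt_b hand + 1))
      (PySem.Int.bor res ((PySem.Int.band deck (((1:Int) <<< compactify_deck_alt_b hand) - 1)) <<< shift))
      (shift + compactify_deck_alt_b hand)
  else
    PySem.Int.bor res (deck <<< shift)
termination_by deck.toNat
decreasing_by
  exact pvShiftToNatLt deck _ _h.2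

def compactify_deck_alt (hand : Int) (deck : Int) : Int :=
  -- assert deck & hand == 0 (raises exactly where A's per-bit assert raises; excluded by Pre_)
  compactify_deck_alt_go hand deck 0 0

-- ===== PRECONDITION & SPEC =====
-- Pre_ excludes inputs where Python A does not return: deck < 0 makes A's `while deck` loop
-- forever, and an overlapping set bit (hand & deck ≠ 0) trips A's assert (AssertionError).
def Pre_compactify_deck (hand : Int) (deck : Int) : Prop :=
  0 ≤ deck ∧ PySem.Int.band hand deck = 0
instance (hand : Int) (deck : Int) : Decidable (Pre_compactify_deck hand deck) := by
  unfold Pre_compactify_deck; infer_instance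

def pvWitness_compactify_deck : Int × Int := (37, 90)

def Spec_compactify_deck (hand : Int) (deck : Int) (out : Int) : Prop := out = compactify_deck_alt hand deck
instance (hand : Int) (deck : Int) (out : Int) : Decidable (Spec_compactify_deck hand deck out) := by unfold Spec_compactify_deck; infer_instance

-- ===== CLAIM (what is proved, stated in full; the proofs are below) =====
def Claim_equal_compactify_deck : Prop := ∀ (hand : Int) (deck : Int), Dom_compactify_deck hand deck → Pre_compactify_deck hand deck → Spec_compactify_deck hand deck (compactify_deck hand deck)

-- ===== LEMMAS AND PROOFS =====

-- Arithmetic reference function: both loops compute `res + G hand deck * 2^pos`.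
def pvG (hand deck : Int) : Int :=
  if _h : 0 < deck then
    if hand % 2 = 0 then deck % 2 + 2 * pvG (hand / 2) (deck / 2)
    else pvG (hand / 2) (deck / 2)
  else 0
termination_by deck.toNat
decreasing_by all_goals omega

theorem pvBorAdd (res x : Int) (i : Nat) (h0 : 0 ≤ res) (h1 : res < 2 ^ i) (hx : 0 ≤ x) :
    PySem.Int.bor res (x <<< i) = res + x * 2 ^ i := by
  obtain ⟨r, rfl⟩ : ∃ r : Nat, res = r := ⟨res.toNat, (Int.toNat_of_nonneg h0).symm⟩
  obtain ⟨n, rfl⟩ : ∃ n : Nat, x = n := ⟨x.toNat, (Int.toNat_of_nonneg hx).symm⟩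
  have hb : r < 2 ^ i := by exact_mod_cast h1
  have hsh : ((n : Int)) <<< i = ((n <<< i : Nat) : Int) := by
    rw [Int.shiftLeft_eq, Nat.shiftLeft_eq]
    push_cast
    ring
  rw [hsh, PySem.Int.bor_of_nonneg (by positivity) (by positivity), Int.toNat_natCast,
    Int.toNat_natCast, Nat.shiftLeft_eq, Nat.or_comm, Nat.mul_comm,
    ← Nat.two_pow_add_eq_or_of_lt hb]
  push_cast
  ring

-- Nat low-bit helpers
theorem pvNatOddAnd (m : Nat) (hm : m % 2 = 1) : m &&& (m - 1) = m - 1 := by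
  apply Nat.eq_of_testBit_eq
  intro i
  cases i with
  | zero =>
    simp only [Nat.testBit_and, Nat.testBit_zero]
    have h1 : (m - 1) % 2 = 0 := by omega
    simp [h1]
  | succ j =>
    rw [Nat.testBit_and, Nat.testBit_add_one, Nat.testBit_add_one]
    have h2 : (m - 1) / 2 = m / 2 := by omega
    rw [h2, Bool.and_self]

theorem pvNatEvenAnd (h : Nat) (hh : 0 < h) : (2 * h) &&& (2 * h - 1) = 2 * (h &&& (h - 1)) := by
  apply Nat.eq_of_testBit_eq
  intro i
  cases i with
  | zero =>
    simp only [Nat.testBit_and, Nat.testBit_zero]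
    have h1 : (2 * h) % 2 = 0 := by omega
    have h2 : (2 * (h &&& (h - 1))) % 2 = 0 := by omega
    simp [h1, h2]
  | succ j =>
    rw [Nat.testBit_and, Nat.testBit_add_one, Nat.testBit_add_one, Nat.testBit_add_one]
    have h1 : (2 * h) / 2 = h := by omega
    have h2 : (2 * h - 1) / 2 = h - 1 := by omega
    have h3 : (2 * (h &&& (h - 1))) / 2 = h &&& (h - 1) := by omega
    rw [h1, h2, h3, Nat.testBit_and]

theorem pvLowbitNat (m : Nat) (hm : 0 < m) :
    m - (m &&& (m - 1)) = 2 ^ (Int.trailingZeros (m : Int)) := by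
  induction m using Nat.strong_induction_on with
  | _ m IH =>
    rcases Nat.even_or_odd m with he | ho
    · obtain ⟨h, hh⟩ := he
      have hh2 : m = 2 * h := by omega
      have hhpos : 0 < h := by omega
      subst hh2
      rw [pvNatEvenAnd h hhpos]
      have hand_le : h &&& (h - 1) ≤ h := Nat.and_le_left
      have hrec := IH h (by omega) hhpos
      have htz : Int.trailingZeros ((2 * h : Nat) : Int) = Int.trailingZeros (h : Int) + 1 := by
        have hcast : ((2 * h : Nat) : Int) = 2 * (h : Int) := by push_cast; ring
        rw [hcast]
        exact Int.trailingZeros_two_mul (by exact_mod_cast hhpos.ne')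
      rw [htz, pow_succ]
      omega
    · have hmod : m % 2 = 1 := Nat.odd_iff.mp ho
      rw [pvNatOddAnd m hmod]
      have htz : Int.trailingZeros (m : Int) = 0 := by
        apply Int.trailingZeros_eq_zero_of_mod_eq
        omega
      rw [htz]
      omega

theorem pvBandNegSelf (hand : Int) (h : hand ≠ 0) :
    PySem.Int.band hand (-hand) = 2 ^ (Int.trailingZeros hand) := by
  rcases lt_trichotomy hand 0 with hneg | hz | hpos
  · rw [PySem.Int.band, if_neg (by omega), if_pos (by omega)]
    have h1 : (-hand - 1).toNat = (-hand).toNat - 1 := by omega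
    rw [h1, pvLowbitNat _ (by omega : 0 < (-hand).toNat)]
    have h3 : (((-hand).toNat : Nat) : Int) = -hand := by omega
    rw [h3, Int.trailingZeros_neg]
    push_cast
    ring
  · exact absurd hz h
  · rw [PySem.Int.band, if_pos (by omega), if_neg (by omega)]
    have h1 : (- -hand - 1).toNat = hand.toNat - 1 := by omega
    rw [h1, pvLowbitNat _ (by omega : 0 < hand.toNat)]
    have h3 : ((hand.toNat : Nat) : Int) = hand := by omega
    rw [h3]
    push_cast
    ring

theorem pvBitLengthPow (t : Nat) : PySem.Int.bitLength ((2:Int) ^ t) = t + 1 := by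
  induction t with
  | zero => decide
  | succ k IH =>
    rw [PySem.Int.bitLength_of_pos (by positivity)]
    have h1 : PySem.Int.floordiv ((2:Int) ^ (k + 1)) 2 = 2 ^ k := by
      rw [PySem.Int.floordiv_eq_ediv_of_pos (by norm_num), pow_succ,
        Int.mul_ediv_cancel _ (by norm_num)]
    rw [h1, IH]

-- A's loop computes res + G * 2^i
theorem pvA_char (deck : Int) (hand res : Int) (i : Nat)
    (hd : 0 ≤ deck) (h0 : 0 ≤ res) (h1 : res < 2 ^ i) :
    compactify_deck_go hand deck res i = res + pvG hand deck * 2 ^ i := by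
  rw [compactify_deck_go, pvG]
  have hband : ∀ a : Int, PySem.Int.band a 1 = a % 2 := by
    intro a; rw [PySem.Int.band_one]; simp [pysem]
  have hshift : ∀ a : Int, a >>> (1:Nat) = a / 2 := by
    intro a; rw [Int.shiftRight_eq_div_pow]; norm_num
  by_cases hpos : 0 < deck
  · rw [dif_pos hpos, dif_pos hpos]
    simp only [hband, hshift]
    by_cases hev : hand % 2 = 0
    · rw [if_pos hev, if_pos hev]
      rw [pvBorAdd res (deck % 2) i h0 h1 (by omega)]
      have hm0 : (0:Int) ≤ deck % 2 * 2 ^ i :=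
        mul_nonneg (by omega) (by positivity)
      have hm1 : deck % 2 * 2 ^ i ≤ 1 * 2 ^ i :=
        mul_le_mul_of_nonneg_right (by omega) (by positivity)
      have hbound : res + deck % 2 * 2 ^ i < 2 ^ (i + 1) := by
        rw [pow_succ]; nlinarith
      rw [pvA_char (deck / 2) (hand / 2) (res + deck % 2 * 2 ^ i) (i + 1)
        (by omega) (by linarith) hbound]
      rw [pow_succ]; ring
    · rw [if_neg hev, if_neg hev]
      exact pvA_char (deck / 2) (hand / 2) res i (by omega) h0 h1
  · rw [dif_neg hpos, dif_neg hpos]; ring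
termination_by deck.toNat
decreasing_by
  all_goals omega

theorem pvG_zero_hand (deck : Int) (hd : 0 ≤ deck) : pvG 0 deck = deck := by
  rw [pvG]
  by_cases hpos : 0 < deck
  · rw [dif_pos hpos, if_pos (by norm_num), show (0:Int) / 2 = 0 from by norm_num]
    rw [pvG_zero_hand (deck / 2) (by omega)]
    omega
  · rw [dif_neg hpos]; omega
termination_by deck.toNat
decreasing_by
  omega

-- G skips a run of t zero-bits of hand at once
theorem pvG_skip (t : Nat) (hand deck : Int) (hd : 0 ≤ deck) (hdvd : ((2:Int) ^ t) ∣ hand) :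
    pvG hand deck = deck % 2 ^ t + 2 ^ t * pvG (hand / 2 ^ t) (deck / 2 ^ t) := by
  induction t generalizing hand deck with
  | zero => simp
  | succ k IH =>
    have hev : hand % 2 = 0 := by
      obtain ⟨q, hq⟩ := hdvd
      have : hand = 2 * (2 ^ k * q) := by rw [hq, pow_succ]; ring
      omega
    by_cases hpos : 0 < deck
    · rw [pvG, dif_pos hpos, if_pos hev]
      obtain ⟨q, hq⟩ := hdvd
      have hhand2 : hand / 2 = 2 ^ k * q := by
        rw [hq, pow_succ, show (2:Int) ^ k * 2 * q = 2 * (2 ^ k * q) from by ring,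
          Int.mul_ediv_cancel_left _ (by norm_num)]
      rw [IH (hand / 2) (deck / 2) (by omega) ⟨q, hhand2⟩]
      have hdd : ∀ a : Int, a / 2 / 2 ^ k = a / 2 ^ (k + 1) := by
        intro a
        rw [Int.ediv_ediv_eq_ediv_mul (by norm_num), ← pow_succ']
      have hmod : deck % 2 + 2 * (deck / 2 % 2 ^ k) = deck % 2 ^ (k + 1) := by
        rw [Int.emod_def, Int.emod_def, Int.emod_def, ← hdd, pow_succ]
        ring
      rw [hdd, hdd, ← hmod, pow_succ]
      ring
    · have hdeck0 : deck = 0 := by omega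
      subst hdeck0
      rw [pvG, dif_neg hpos, Int.zero_ediv, Int.zero_emod, pvG, dif_neg (by omega)]
      ring

-- B's loop computes res + G * 2^shift
theorem pvB_char (deck : Int) (hand res : Int) (shift : Nat)
    (hd : 0 ≤ deck) (h0 : 0 ≤ res) (h1 : res < 2 ^ shift) :
    compactify_deck_alt_go hand deck res shift = res + pvG hand deck * 2 ^ shift := by
  rw [compactify_deck_alt_go]
  by_cases hg : hand ≠ 0 ∧ 0 < deck
  · rw [dif_pos hg]
    obtain ⟨hh0, hdpos⟩ := hg
    have hb : compactify_deck_alt_b hand = Int.trailingZeros hand := by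
      rw [compactify_deck_alt_b, pvBandNegSelf hand hh0, pvBitLengthPow]
      omega
    rw [hb]
    set t := Int.trailingZeros hand with ht
    have hpt : (0:Int) < 2 ^ t := by positivity
    have hmask : ((1:Int) <<< t) - 1 = 2 ^ t - 1 := by rw [Int.shiftLeft_eq]; ring
    have hcast : ((2:Int) ^ t) = ((2 ^ t : Nat) : Int) := by push_cast; ring
    have hband : PySem.Int.band deck ((2:Int) ^ t - 1) = deck % 2 ^ t := by
      rw [PySem.Int.band_of_nonneg hd (by omega)]
      have hc : ((2:Int) ^ t - 1).toNat = 2 ^ t - 1 := by omega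
      rw [hc, Nat.and_two_pow_sub_one_eq_mod]
      have h3 : deck = (deck.toNat : Int) := by omega
      conv_rhs => rw [h3, hcast]
      push_cast
      ring
    rw [hmask, hband]
    have hq0 : (0:Int) ≤ deck % 2 ^ t := Int.emod_nonneg deck (by omega)
    rw [pvBorAdd res (deck % 2 ^ t) shift h0 h1 hq0]
    have hqlt : deck % 2 ^ t < 2 ^ t := Int.emod_lt_of_pos deck hpt
    have hps : (0:Int) < 2 ^ shift := by positivity
    have hm0 : (0:Int) ≤ deck % 2 ^ t * 2 ^ shift := mul_nonneg hq0 (by omega)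
    have hbound : res + deck % 2 ^ t * 2 ^ shift < 2 ^ (shift + t) := by
      have hmul : deck % 2 ^ t * 2 ^ shift ≤ (2 ^ t - 1) * 2 ^ shift :=
        mul_le_mul_of_nonneg_right (by omega) (by omega)
      have hpa : (2:Int) ^ (shift + t) = 2 ^ t * 2 ^ shift := by
        rw [pow_add]; ring
      nlinarith
    have hsr : ∀ a : Int, a >>> (t + 1) = a / 2 ^ (t + 1) := by
      intro a
      rw [Int.shiftRight_eq_div_pow]
      norm_num
    rw [hsr, hsr]
    rw [pvB_char (deck / 2 ^ (t + 1)) (hand / 2 ^ (t + 1)) _ (shift + t)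
      (Int.ediv_nonneg hd (by positivity)) (by linarith) hbound]
    rw [pvG_skip t hand deck hd (Int.two_pow_trailingZeros_dvd hh0)]
    have hodd : (hand / 2 ^ t) % 2 = 1 := by
      have h4 := Int.shiftRight_trailingZeros_mod_two hh0
      rwa [Int.shiftRight_eq_div_pow,
        show (((2 ^ t : Nat)) : Int) = (2:Int) ^ t from by push_cast; ring] at h4
    have hdd : ∀ a : Int, a / 2 ^ t / 2 = a / 2 ^ (t + 1) := by
      intro a
      rw [Int.ediv_ediv_eq_ediv_mul (by positivity), ← pow_succ]
    have hstep : pvG (hand / 2 ^ t) (deck / 2 ^ t) = pvG (hand / 2 ^ (t + 1)) (deck / 2 ^ (t + 1)) := by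
      by_cases hp : 0 < deck / 2 ^ t
      · rw [pvG, dif_pos hp, if_neg (by omega), hdd, hdd]
      · have hz : deck / 2 ^ t = 0 := by
          have h5 := Int.ediv_nonneg hd (le_of_lt hpt)
          omega
        have hz2 : deck / 2 ^ (t + 1) = 0 := by
          rw [← hdd, hz]; norm_num
        rw [hz, hz2, pvG, dif_neg (by omega), pvG, dif_neg (by omega)]
    rw [hstep, pow_add]
    ring
  · rw [dif_neg hg]
    by_cases hh : hand = 0
    · subst hh
      rw [pvBorAdd res deck shift h0 h1 hd, pvG_zero_hand deck hd]
    · have hnd : ¬ 0 < deck := fun hp => hg ⟨hh, hp⟩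
      have hdeck : deck = 0 := by omega
      subst hdeck
      rw [Int.zero_shiftLeft, PySem.Int.bor_zero, pvG, dif_neg (by omega)]
      ring
termination_by deck.toNat
decreasing_by
  show (deck / 2 ^ (t + 1)).toNat < deck.toNat
  have hc : (2:Int) ≤ 2 ^ (t + 1) := by
    calc (2:Int) = 2 ^ 1 := by norm_num
    _ ≤ 2 ^ (t + 1) := by
      apply pow_le_pow_right₀ (by norm_num) (by omega)
  have h5 := pvEdivLt deck _ hdpos hc
  have h6 := Int.ediv_nonneg hd (by positivity : (0:Int) ≤ 2 ^ (t + 1))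
  omega

-- ===== VERDICT (by name: the statement is the Claim_ definition above) =====
theorem compactify_deck_spec : Claim_equal_compactify_deck := by
  intro hand deck _hdom hpre
  unfold Spec_compactify_deck compactify_deck compactify_deck_alt
  rw [pvA_char deck hand 0 0 hpre.1 le_rfl (by norm_num),
      pvB_char deck hand 0 0 hpre.1 le_rfl (by norm_num)]
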